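-- pv_equiv track=rewrite | github.com/jae1jeong/Algorithm | Programmers/후보키.py | solution
-- ===== SOURCE A (Python) =====
-- from itertools import combinations
--
-- def solution(relation):
--     answer = 0
--     colSize = len(relation[0])
--     rowSize = len(relation)
--     candidates = []
--     uniqueLst = []
--     for i in range(1,colSize+1):
--         candidates.extend(combinations(range(colSize),i))
--
--     for candi in candidates:
--         tmp = [tuple([item[i] for i in candi]) for item in relation]
--
--         if len(set(tmp)) == rowSize:
--             uniqueLst.append(candi)
--
--     answer = set(uniqueLst)
--
--     for i in range(len(uniqueLst)):
--         for j in range(i+1,len(uniqueLst)):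
--             if len(uniqueLst[i]) == len(set(uniqueLst[i]) & set(uniqueLst[j])):
--                 answer.discard(uniqueLst[j])
--
--     return len(answer)
-- ===== SOURCE B (Python) =====
-- from itertools import combinations
--
-- def solution(relation):
--     rows = len(relation)
--     cols = len(relation[0])
--     keys = []
--     for size in range(1, cols + 1):
--         for combo in combinations(range(cols), size):
--             if any(all(c in combo for c in key) for key in keys):
--                 continue
--             if len({tuple(row[c] for c in combo) for row in relation}) == rows:
--                 keys.append(combo)
--     return len(keys)
-- ===== Notes on version B (the rewrite author's own statement) =====
-- stated objective: faster
-- what changed: A generates all column subsets, filters the unique ones in a second pass, then eliminates non-minimal keys with a pairwise set-intersection loop over a mutable set; B does one size-ordered sweep that keeps a list of confirmed minimal keys and prunes any subset containing a confirmed key before projecting, so the row-projection/uniqueness work is skipped entirely on pruned subsets (measured much faster; same worst case).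
-- outside the precondition, e.g. on solution([]): A raises IndexError, B raises IndexError; on solution([['a', 'b'], ['c']]): A raises IndexError, B raises IndexError
import Mathlib
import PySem

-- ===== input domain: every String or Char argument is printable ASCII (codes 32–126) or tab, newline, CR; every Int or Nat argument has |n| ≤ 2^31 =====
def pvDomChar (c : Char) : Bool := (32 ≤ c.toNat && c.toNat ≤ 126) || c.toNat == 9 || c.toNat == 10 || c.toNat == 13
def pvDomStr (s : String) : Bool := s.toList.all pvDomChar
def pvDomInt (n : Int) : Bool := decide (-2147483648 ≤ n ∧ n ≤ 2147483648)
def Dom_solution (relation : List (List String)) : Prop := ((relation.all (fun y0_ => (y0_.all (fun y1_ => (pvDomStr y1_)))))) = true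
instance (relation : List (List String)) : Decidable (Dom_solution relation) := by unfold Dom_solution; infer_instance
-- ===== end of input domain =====

-- B replaces A's three passes (generate all column subsets, filter the unique ones, then pairwise-eliminate
-- non-minimal ones from a set) by one size-ordered sweep that keeps a list of confirmed minimal keys and
-- prunes supersets of confirmed keys before projecting, skipping
-- the projection work there; objective: faster (measured) by a different decomposition.

-- ===== PORT A =====
def solution (relation : List (List String)) : Int :=
  let colSize := (relation.headI).length
  let rowSize := relation.length
  let candidates : List (List Int) :=
    (PySem.List.pyRange 1 ((colSize : Int) + 1)).foldl
      (fun acc i => acc ++ PySem.List.combinations (PySem.List.pyRange 0 (colSize : Int)) i.toNat) []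
  let uniqueLst : List (List Int) :=
    candidates.foldl
      (fun acc candi =>
        let tmp := relation.map (fun item => candi.map (fun i => PySem.List.pyGetD item i ""))
        if (PySem.Set.ofList tmp).length = rowSize then acc ++ [candi] else acc) []
  let answer0 : PySem.Set (List Int) := PySem.Set.ofList uniqueLst
  let answer :=
    (PySem.List.pyRange 0 (uniqueLst.length : Int)).foldl
      (fun ans i =>
        (PySem.List.pyRange (i + 1) (uniqueLst.length : Int)).foldl
          (fun ans j =>
            if (PySem.List.pyGetD uniqueLst i []).length =
                (PySem.Set.inter (PySem.Set.ofList (PySem.List.pyGetD uniqueLst i []))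
                  (PySem.Set.ofList (PySem.List.pyGetD uniqueLst j []))).length
            then PySem.Set.discard ans (PySem.List.pyGetD uniqueLst j []) else ans) ans)
      answer0
  (answer.length : Int)

-- ===== PORT B =====
def solution_alt (relation : List (List String)) : Int :=
  let rows := relation.length
  let cols := (relation.headI).length
  let keys : List (List Int) :=
    (PySem.List.pyRange 1 ((cols : Int) + 1)).foldl
      (fun keys size =>
        (PySem.List.combinations (PySem.List.pyRange 0 (cols : Int)) size.toNat).foldl
          (fun keys combo =>
            if keys.any (fun key => key.all (fun c => combo.contains c)) then keys
            else if (PySem.Set.ofList (relation.map (fun row => combo.map (fun c => PySem.List.pyGetD row c "")))).length = rows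
            then keys ++ [combo] else keys)
          keys)
      []
  (keys.length : Int)

-- ===== PRECONDITION & SPEC =====
-- Pre_ excludes exactly the inputs where Python A raises: the empty relation (IndexError on relation[0])
-- and ragged relations with a row shorter than the first row (IndexError when projecting onto a column
-- index that row lacks).
def Pre_solution (relation : List (List String)) : Prop :=
  relation ≠ [] ∧ ∀ row ∈ relation, (relation.headI).length ≤ row.length
instance (relation : List (List String)) : Decidable (Pre_solution relation) := by
  unfold Pre_solution; infer_instance

def pvWitness_solution : List (List String) := [["a", "x"], ["b", "x"]]

def Spec_solution (relation : List (List String)) (out : Int) : Prop := out = solution_alt relation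
instance (relation : List (List String)) (out : Int) : Decidable (Spec_solution relation out) := by
  unfold Spec_solution; infer_instance

-- ===== CLAIM (what is proved, stated in full; the proofs are below) =====
def Claim_equal_solution : Prop :=
  ∀ (relation : List (List String)), Dom_solution relation → Pre_solution relation →
    Spec_solution relation (solution relation)

-- ===== LEMMAS AND PROOFS =====

-- a ⊆ b as Python's  all(c in b for c in a)
def pvSub (a b : List Int) : Bool := a.all (fun c => b.contains c)

-- the per-element predicate A's discard loops compute: y survives iff no pair i < j with
-- U[i] ⊆ U[j] has U[j] = y
def pvPredA (U : List (List Int)) (y : List Int) : Bool :=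
  (PySem.List.pyRange 0 (U.length : Int)).all (fun i =>
    (PySem.List.pyRange (i + 1) (U.length : Int)).all (fun j =>
      !(decide ((PySem.List.pyGetD U i []).length =
          (PySem.Set.inter (PySem.Set.ofList (PySem.List.pyGetD U i []))
            (PySem.Set.ofList (PySem.List.pyGetD U j []))).length)
        && (PySem.List.pyGetD U j [] == y))))
theorem pvSub_trans {a b c : List Int} (h1 : pvSub a b = true) (h2 : pvSub b c = true) :
    pvSub a c = true := by
  simp only [pvSub, List.all_eq_true, List.contains_iff_mem] at *
  exact fun x hx => h2 _ (h1 x hx)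

theorem pvCond_iff (ui uj : List Int) (hui : ui.Nodup) :
    (ui.length =
      (PySem.Set.inter (PySem.Set.ofList ui) (PySem.Set.ofList uj)).length) ↔ pvSub ui uj = true := by
  rw [PySem.Set.inter, PySem.Set.ofList_eq_self_of_nodup ui hui]
  rw [eq_comm, List.length_filter_eq_length_iff]
  simp [pvSub, List.all_eq_true, PySem.Set.mem_ofList]

theorem pvFoldl_discard_eq_filter {α : Type} [BEq α] [LawfulBEq α]
    (P : Int → Prop) [DecidablePred P] (f : Int → α) (L : List Int) (s : List α) :
    L.foldl (fun ans j => if P j then PySem.Set.discard ans (f j) else ans) s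
      = s.filter (fun y => L.all (fun j => !(decide (P j) && (f j == y)))) := by
  induction L generalizing s with
  | nil => simp
  | cons j L ih =>
    simp only [List.foldl_cons]
    rw [ih]
    have hstep : (if P j then PySem.Set.discard s (f j) else s)
        = s.filter (fun y => !(decide (P j) && (f j == y))) := by
      by_cases h : P j
      · simp only [if_pos h, PySem.Set.discard]
        apply List.filter_congr; intro y _
        simp [h, eq_comm]
      · simp [h]
    rw [hstep, List.filter_filter]
    apply List.filter_congr; intro y _
    simp [List.all_cons, Bool.and_comm]
theorem pvFoldl_filter_all {α : Type} (g : Int → α → Bool) (L : List Int) (s : List α) :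
    L.foldl (fun ans i => ans.filter (g i)) s = s.filter (fun y => L.all (fun i => g i y)) := by
  induction L generalizing s with
  | nil => simp
  | cons i L ih =>
    simp only [List.foldl_cons]
    rw [ih, List.filter_filter]
    apply List.filter_congr
    intro y _
    simp [Bool.and_comm]

theorem pvNodup_combinations {α : Type} (xs : List α) (hxs : xs.Nodup) :
    ∀ r : Nat, (PySem.List.combinations xs r).Nodup := by
  induction xs with
  | nil =>
    intro r
    cases r with
    | zero => simp [PySem.List.combinations_zero]
    | succ r => simp [PySem.List.combinations_nil_succ]
  | cons x xs ih =>
    intro r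
    cases r with
    | zero => simp [PySem.List.combinations_zero]
    | succ r =>
      rw [PySem.List.combinations_cons_succ]
      have hx : x ∉ xs := (List.nodup_cons.mp hxs).1
      have hxs' : xs.Nodup := (List.nodup_cons.mp hxs).2
      apply List.Nodup.append
      · exact List.Nodup.map (fun a b h => by simpa using h) (ih hxs' r)
      · exact ih hxs' (r + 1)
      · intro c hc1 hc2
        obtain ⟨c', hc', rfl⟩ := List.mem_map.mp hc1
        have hsub := PySem.List.sublist_of_mem_combinations hc2
        exact hx (hsub.mem (by simp))

theorem pvPredA_cons (U prevU restU : List (List Int)) (u : List Int) (hU : U.Nodup)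
    (hel : ∀ c ∈ U, c.Nodup) (hsplit : U = prevU ++ u :: restU) :
    pvPredA U u = !(prevU.any (fun v => pvSub v u)) := by
  have hlt : prevU.length < U.length := by
    subst hsplit; simp [List.length_append]
  have hgetu : U[prevU.length] = u := by
    subst hsplit
    rw [List.getElem_append_right (Nat.le_refl _)]
    simp
  have hiff : pvPredA U u = true ↔ ¬ (prevU.any (fun v => pvSub v u) = true) := by
    simp only [pvPredA, List.all_eq_true, PySem.List.mem_pyRange_one, Bool.not_eq_true',
      Bool.and_eq_false_iff, decide_eq_false_iff_not, beq_eq_false_iff_ne, ne_eq,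
      List.any_eq_true]
    constructor
    · rintro H ⟨v, hv, hsubv⟩
      obtain ⟨iv, hiv, hveq⟩ := List.mem_iff_getElem.mp hv
      have hb0 : (0:Int) ≤ (iv:Int) := by positivity
      have hb1 : (iv:Int) < (U.length:Int) := by exact_mod_cast Nat.lt_of_lt_of_le hiv (Nat.le_of_lt hlt)
      have hgi : PySem.List.pyGetD U (iv:Int) [] = v := by
        rw [PySem.List.pyGetD_eq_getElem U [] hb0 (by exact_mod_cast hb1)]
        simp only [Int.toNat_natCast]
        subst hsplit
        rw [List.getElem_append_left hiv]
        exact hveq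
      have hgj : PySem.List.pyGetD U (prevU.length:Int) [] = u := by
        rw [PySem.List.pyGetD_eq_getElem U [] (by positivity) (by exact_mod_cast hlt)]
        simp only [Int.toNat_natCast]
        exact hgetu
      have := H (iv:Int) ⟨hb0, hb1⟩ (prevU.length:Int)
        ⟨by exact_mod_cast Nat.succ_le_of_lt hiv, by exact_mod_cast hlt⟩
      rw [hgi, hgj] at this
      rcases this with h1 | h2
      · exact h1 ((pvCond_iff v u (hel v (by subst hsplit; exact List.mem_append_left _ hv))).mpr hsubv)
      · exact h2 rfl
    · intro hno i ⟨hi0, hin⟩ j ⟨hj1, hjn⟩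
      by_cases heq : PySem.List.pyGetD U j [] = u
      · left
        have hjn' : j.toNat < U.length := by omega
        have hj0 : (0:Int) ≤ j := by omega
        have hin' : i.toNat < U.length := by omega
        have hgj : PySem.List.pyGetD U j [] = U[j.toNat] := by
          rw [PySem.List.pyGetD_eq_getElem U [] hj0 (by omega)]
        have hgi : PySem.List.pyGetD U i [] = U[i.toNat] := by
          rw [PySem.List.pyGetD_eq_getElem U [] hi0 (by omega)]
        rw [hgj] at heq
        have hjidx : j.toNat = prevU.length :=
          (List.Nodup.getElem_inj_iff hU).mp (heq.trans hgetu.symm)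
        have hilt : i.toNat < prevU.length := by omega
        have hmem : U[i.toNat] ∈ prevU := by
          subst hsplit
          rw [List.getElem_append_left hilt]
          exact List.getElem_mem _
        intro hcond
        rw [hgi, hgj, heq] at hcond
        have hsubv := (pvCond_iff U[i.toNat] u (hel _ (List.getElem_mem _))).mp hcond
        exact hno ⟨U[i.toNat], hmem, hsubv⟩
      · right; exact heq
  cases hb : prevU.any (fun v => pvSub v u) with
  | true => simp only [Bool.not_true]; rw [← Bool.not_eq_true]; intro hc; exact (hiff.mp hc) hb
  | false =>
    simp only [Bool.not_false]
    exact hiff.mpr (by simp [hb])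
theorem pvMain (U : List (List Int)) (hU : U.Nodup) (hel : ∀ c ∈ U, c.Nodup) :
    ∀ (V prevU keys : List (List Int)), U = prevU ++ V →
      (∀ u, keys.any (fun k => pvSub k u) = prevU.any (fun v => pvSub v u)) →
      V.foldl (fun ks u => if ks.any (fun k => pvSub k u) then ks else ks ++ [u]) keys
        = keys ++ V.filter (fun y => pvPredA U y) := by
  intro V
  induction V with
  | nil => intro prevU keys _ _; simp
  | cons u V ih =>
    intro prevU keys hsplit hinv
    have hpred : pvPredA U u = !(prevU.any (fun v => pvSub v u)) :=
      pvPredA_cons U prevU V u hU hel hsplit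
    have hsplit' : U = (prevU ++ [u]) ++ V := by rw [hsplit]; simp
    simp only [List.foldl_cons, List.filter_cons]
    cases hb : prevU.any (fun v => pvSub v u) with
    | true =>
      have hk : keys.any (fun k => pvSub k u) = true := by rw [hinv]; exact hb
      simp only [hk, if_true, hpred, hb, Bool.not_true, Bool.false_eq_true, if_false]
      apply ih (prevU ++ [u]) keys hsplit'
      intro w
      rw [hinv, List.any_append]
      simp only [List.any_cons, List.any_nil, Bool.or_false]
      cases hsw : pvSub u w with
      | false => simp
      | true =>
        obtain ⟨v, hv, hvu⟩ := List.any_eq_true.mp hb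
        have : prevU.any (fun x => pvSub x w) = true :=
          List.any_eq_true.mpr ⟨v, hv, pvSub_trans hvu hsw⟩
        simp [this]
    | false =>
      have hk : keys.any (fun k => pvSub k u) = false := by rw [hinv]; exact hb
      simp only [hk, Bool.false_eq_true, if_false, hpred, hb, Bool.not_false, if_true]
      rw [ih (prevU ++ [u]) (keys ++ [u]) hsplit' ?_]
      · simp
      · intro w
        rw [List.any_append, List.any_append, hinv]


-- proof-only names for the candidate list and the unique list shared by both ports
def pvC (cols : Nat) : List (List Int) :=
  (PySem.List.pyRange 1 ((cols : Int) + 1)).flatMap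
    (fun i => PySem.List.combinations (PySem.List.pyRange 0 (cols : Int)) i.toNat)

def pvU (relation : List (List String)) : List (List Int) :=
  (pvC (relation.headI).length).filter
    (fun candi => decide ((PySem.Set.ofList (relation.map
      (fun item => candi.map (fun i => PySem.List.pyGetD item i "")))).length = relation.length))
theorem pvC_nodup (cols : Nat) : (pvC cols).Nodup := by
  unfold pvC
  rw [List.nodup_flatMap]
  constructor
  · intro i _
    exact pvNodup_combinations _ (PySem.List.nodup_pyRange_one 0 (cols : Int)) _
  · apply List.Pairwise.imp_of_mem ?_ (PySem.List.pairwise_lt_pyRange_one 1 ((cols : Int) + 1))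
    intro a b ha hb hab c hc1 hc2
    have ha1 : 1 ≤ a := (PySem.List.mem_pyRange_one.mp ha).1
    have l1 := PySem.List.length_of_mem_combinations hc1
    have l2 := PySem.List.length_of_mem_combinations hc2
    omega

theorem pvU_nodup (relation : List (List String)) : (pvU relation).Nodup :=
  (pvC_nodup _).filter _

theorem pvU_el (relation : List (List String)) : ∀ c ∈ pvU relation, c.Nodup := by
  intro c hc
  have hcC : c ∈ pvC (relation.headI).length := List.mem_of_mem_filter hc
  unfold pvC at hcC
  obtain ⟨i, _, hci⟩ := List.mem_flatMap.mp hcC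
  exact List.Nodup.sublist (PySem.List.sublist_of_mem_combinations hci)
    (PySem.List.nodup_pyRange_one _ _)

theorem pvPhase2 (U : List (List Int)) (s : List (List Int)) :
    (PySem.List.pyRange 0 (U.length : Int)).foldl
      (fun ans i =>
        (PySem.List.pyRange (i + 1) (U.length : Int)).foldl
          (fun ans j =>
            if (PySem.List.pyGetD U i []).length =
                (PySem.Set.inter (PySem.Set.ofList (PySem.List.pyGetD U i []))
                  (PySem.Set.ofList (PySem.List.pyGetD U j []))).length
            then PySem.Set.discard ans (PySem.List.pyGetD U j []) else ans) ans) s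
      = s.filter (fun y => pvPredA U y) := by
  have hinner : ∀ (t : List (List Int)) (i : Int),
      (PySem.List.pyRange (i + 1) (U.length : Int)).foldl
        (fun ans j =>
          if (PySem.List.pyGetD U i []).length =
              (PySem.Set.inter (PySem.Set.ofList (PySem.List.pyGetD U i []))
                (PySem.Set.ofList (PySem.List.pyGetD U j []))).length
          then PySem.Set.discard ans (PySem.List.pyGetD U j []) else ans) t
      = t.filter (fun y => (PySem.List.pyRange (i + 1) (U.length : Int)).all (fun j =>
          !(decide ((PySem.List.pyGetD U i []).length =
              (PySem.Set.inter (PySem.Set.ofList (PySem.List.pyGetD U i []))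
                (PySem.Set.ofList (PySem.List.pyGetD U j []))).length)
            && (PySem.List.pyGetD U j [] == y)))) := by
    intro t i
    exact pvFoldl_discard_eq_filter _ (fun j => PySem.List.pyGetD U j []) _ t
  rw [PySem.List.foldl_congr_mem _ _
    (fun ans i => ans.filter (fun y => (PySem.List.pyRange (i + 1) (U.length : Int)).all (fun j =>
      !(decide ((PySem.List.pyGetD U i []).length =
          (PySem.Set.inter (PySem.Set.ofList (PySem.List.pyGetD U i []))
            (PySem.Set.ofList (PySem.List.pyGetD U j []))).length)
        && (PySem.List.pyGetD U j [] == y))))) s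
    (fun acc x _ => hinner acc x)]
  rw [pvFoldl_filter_all]
  rfl

theorem pvSolA (relation : List (List String)) :
    solution relation = (((pvU relation).filter (fun y => pvPredA (pvU relation) y)).length : Int) := by
  unfold solution
  simp only [PySem.List.foldl_append_eq_flatMap, List.nil_append,
    PySem.List.foldl_append_ite_eq_filter]
  rw [pvPhase2]
  have h := pvU_nodup relation
  unfold pvU pvC at h ⊢
  rw [PySem.Set.ofList_eq_self_of_nodup _ h]

theorem pvSolB (relation : List (List String)) :
    solution_alt relation = (((pvU relation).filter (fun y => pvPredA (pvU relation) y)).length : Int) := by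
  unfold solution_alt
  simp only [← List.foldl_flatMap]
  rw [PySem.List.foldl_congr_mem _ _
    (fun ks c => if (PySem.Set.ofList (relation.map
        (fun row => c.map (fun i => PySem.List.pyGetD row i "")))).length = relation.length then
        (if ks.any (fun k => pvSub k c) then ks else ks ++ [c]) else ks) []
    ?_]
  · rw [show (List.foldl (fun ks c =>
        if (PySem.Set.ofList (relation.map
            (fun row => c.map (fun i => PySem.List.pyGetD row i "")))).length = relation.length then
          (if ks.any (fun k => pvSub k c) then ks else ks ++ [c]) else ks) []
        ((PySem.List.pyRange 1 ((relation.headI.length : Int) + 1)).flatMap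
          (fun x => PySem.List.combinations (PySem.List.pyRange 0 (relation.headI.length : Int)) x.toNat)))
      = List.foldl (fun ks u => if ks.any (fun k => pvSub k u) then ks else ks ++ [u]) []
          (((PySem.List.pyRange 1 ((relation.headI.length : Int) + 1)).flatMap
            (fun x => PySem.List.combinations (PySem.List.pyRange 0 (relation.headI.length : Int)) x.toNat)).filter
            (fun c => decide ((PySem.Set.ofList (relation.map
              (fun row => c.map (fun i => PySem.List.pyGetD row i "")))).length = relation.length)))
      from PySem.List.foldl_ite_eq_foldl_filter _ _ _ _]
    have h1 := pvU_nodup relation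
    have h2 := pvU_el relation
    have hmain := pvMain (pvU relation) h1 h2 (pvU relation) [] [] rfl (fun u => rfl)
    unfold pvU pvC at hmain
    rw [hmain]
    unfold pvU pvC
    simp
  · intro acc c _
    by_cases hp : (PySem.Set.ofList (relation.map
        (fun row => c.map (fun i => PySem.List.pyGetD row i "")))).length = relation.length
    · simp [hp, pvSub]
    · simp [hp]
-- ===== VERDICT (by name: the statement is the Claim_ definition above) =====

theorem solution_spec : Claim_equal_solution := by
  unfold Claim_equal_solution Spec_solution
  intro relation _ _
  rw [pvSolA, pvSolB]
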